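-- pv_equiv track=rewrite | github.com/snhryt/keras | python/system.py | storeBeginAndEndIndicesOfSequentialNumbers
-- ===== SOURCE A (Python) =====
-- def storeBeginAndEndIndicesOfSequentialNumbers(sequential_nums):
--     """
--     Store begin_indices and end_indices of a sequential numbers list.
--     E.g. where [1, 1, 2, 3, 3, 3] is given, this function returns [0, 2, 3] and [1, 2, 5].
--     """
--     begin_indices = [0]
--     for i in range(1, len(sequential_nums)):
--         if sequential_nums[i - 1] != sequential_nums[i]:
--             begin_indices.append(i)
--
--     end_indices = [None] * len(begin_indices)
--     for i in range(len(begin_indices) - 1):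
--         end_indices[i] = begin_indices[i + 1] - 1
--     if begin_indices[-1] == len(sequential_nums) - 1:
--         end_indices[len(begin_indices) - 1] = begin_indices[-1]
--     else:
--         end_indices[len(begin_indices) - 1] = len(sequential_nums) - 1
--     return begin_indices, end_indices
-- ===== SOURCE B (Python) =====
-- def storeBeginAndEndIndicesOfSequentialNumbers(sequential_nums):
--     """Single pass: record each run boundary once, appending to both lists."""
--     begin_indices = [0]
--     end_indices = []
--     for i in range(1, len(sequential_nums)):
--         if sequential_nums[i - 1] != sequential_nums[i]:
--             end_indices.append(i - 1)
--             begin_indices.append(i)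
--     end_indices.append(len(sequential_nums) - 1)
--     return begin_indices, end_indices
-- ===== Notes on version B (the rewrite author's own statement) =====
-- stated objective: simpler
-- what changed: One pass that records each run boundary into both lists as it is found, replacing A's second derivation pass over begin_indices and its redundant last-element if/else with a single final append of len-1.
import Mathlib
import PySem

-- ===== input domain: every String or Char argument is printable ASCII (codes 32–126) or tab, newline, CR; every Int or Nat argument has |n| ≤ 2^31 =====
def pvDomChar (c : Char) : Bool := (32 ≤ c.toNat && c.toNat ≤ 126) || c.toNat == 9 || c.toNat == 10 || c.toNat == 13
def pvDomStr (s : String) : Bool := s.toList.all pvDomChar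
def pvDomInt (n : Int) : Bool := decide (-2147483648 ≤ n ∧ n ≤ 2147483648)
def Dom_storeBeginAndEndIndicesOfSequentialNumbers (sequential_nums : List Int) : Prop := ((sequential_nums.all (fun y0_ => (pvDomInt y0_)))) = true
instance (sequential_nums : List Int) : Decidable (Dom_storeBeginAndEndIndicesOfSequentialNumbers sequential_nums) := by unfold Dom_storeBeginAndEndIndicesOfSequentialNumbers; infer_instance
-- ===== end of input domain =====

-- B fuses A's two passes into one: each run boundary is appended to both lists as it
-- is found, and a single final append of len-1 replaces A's second pass and its
-- redundant last-element if/else (objective: simpler).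

-- ===== PORT A =====
-- literal port of A; the [None]*len placeholder is ported as 0 (every slot is
-- overwritten before the list is returned, so the placeholder value never escapes)
def storeBeginAndEndIndicesOfSequentialNumbers (sequential_nums : List Int) : List Int × List Int :=
  let n : Int := sequential_nums.length
  let begin_indices : List Int :=
    (PySem.List.pyRange 1 n 1).foldl
      (fun acc i =>
        if PySem.List.pyGetD sequential_nums (i - 1) 0 ≠ PySem.List.pyGetD sequential_nums i 0
        then acc ++ [i] else acc) [0]
  let end0 : List Int := List.replicate begin_indices.length 0
  let end1 : List Int :=
    (PySem.List.pyRange 0 ((begin_indices.length : Int) - 1) 1).foldl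
      (fun e i => PySem.List.pySetD e i (PySem.List.pyGetD begin_indices (i + 1) 0 - 1)) end0
  let end2 : List Int :=
    if PySem.List.pyGetD begin_indices (-1) 0 = n - 1
    then PySem.List.pySetD end1 ((begin_indices.length : Int) - 1) (PySem.List.pyGetD begin_indices (-1) 0)
    else PySem.List.pySetD end1 ((begin_indices.length : Int) - 1) (n - 1)
  (begin_indices, end2)

-- ===== PORT B =====
def storeBeginAndEndIndicesOfSequentialNumbers_alt (sequential_nums : List Int) : List Int × List Int :=
  let n : Int := sequential_nums.length
  let p : List Int × List Int :=
    (PySem.List.pyRange 1 n 1).foldl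
      (fun p i =>
        if PySem.List.pyGetD sequential_nums (i - 1) 0 ≠ PySem.List.pyGetD sequential_nums i 0
        then (p.1 ++ [i], p.2 ++ [i - 1]) else p) ([0], [])
  (p.1, p.2 ++ [n - 1])

-- ===== PRECONDITION & SPEC =====
def Spec_storeBeginAndEndIndicesOfSequentialNumbers (sequential_nums : List Int) (out : List Int × List Int) : Prop := out = storeBeginAndEndIndicesOfSequentialNumbers_alt sequential_nums
instance (sequential_nums : List Int) (out : List Int × List Int) : Decidable (Spec_storeBeginAndEndIndicesOfSequentialNumbers sequential_nums out) := by unfold Spec_storeBeginAndEndIndicesOfSequentialNumbers; infer_instance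

-- ===== CLAIM (what is proved, stated in full; the proofs are below) =====
def Claim_equal_storeBeginAndEndIndicesOfSequentialNumbers : Prop := ∀ (sequential_nums : List Int), Dom_storeBeginAndEndIndicesOfSequentialNumbers sequential_nums → Spec_storeBeginAndEndIndicesOfSequentialNumbers sequential_nums (storeBeginAndEndIndicesOfSequentialNumbers sequential_nums)

-- ===== LEMMAS AND PROOFS =====

-- B's single loop with its paired accumulator equals the filtered boundary list
-- together with the same list shifted down by one.
theorem pv_foldB (P : Int → Prop) [DecidablePred P] (l : List Int) (acc e : List Int) :
    l.foldl (fun p i => if P i then (p.1 ++ [i], p.2 ++ [i - 1]) else p) ((acc, e) : List Int × List Int)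
      = (acc ++ l.filter (fun i => decide (P i)),
         e ++ (l.filter (fun i => decide (P i))).map (· - 1)) := by
  induction l generalizing acc e with
  | nil => simp
  | cons x t ih =>
    simp only [List.foldl_cons]
    by_cases h : P x
    · rw [if_pos h, ih]
      simp [h]
    · rw [if_neg h, ih]
      simp [h]

-- A's fill loop: setting indices 0..k-1 of e0 to f i yields a map-prefix plus the
-- untouched suffix of e0.
theorem pv_setloop (f : Int → Int) : ∀ (k : Nat) (e0 : List Int), k ≤ e0.length →
    (PySem.List.pyRange 0 (k : Int) 1).foldl (fun e i => PySem.List.pySetD e i (f i)) e0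
      = (PySem.List.pyRange 0 (k : Int) 1).map f ++ e0.drop k := by
  intro k
  induction k with
  | zero => intro e0 _; rw [PySem.List.pyRange_one_eq_nil (by omega)]; simp
  | succ k ih =>
    intro e0 hk
    have h1 : ((k + 1 : Nat) : Int) = (k : Int) + 1 := by push_cast; ring
    rw [h1, PySem.List.pyRange_one_succ_right (by positivity), List.foldl_append,
        ih e0 (by omega), List.map_append]
    have hlen : ((PySem.List.pyRange 0 (k : Int) 1).map f).length = k := by
      simp [PySem.List.length_pyRange_one]
    have hdrop : e0.drop k = e0[k] :: e0.drop (k + 1) :=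
      (List.drop_eq_getElem_cons (by omega)).trans rfl
    simp only [List.foldl_cons, List.foldl_nil, PySem.List.pySetD_natCast]
    rw [List.set_append_right k (f (k : Int)) (by omega), hlen, Nat.sub_self, hdrop]
    rw [List.set_cons_zero]
    simp

-- the map part of the fill loop is the boundary list shifted down by one
theorem pv_map_shift (F : List Int) :
    (PySem.List.pyRange 0 (F.length : Int) 1).map
        (fun i => PySem.List.pyGetD (0 :: F) (i + 1) 0 - 1)
      = F.map (· - 1) := by
  apply List.ext_getElem
  · simp [PySem.List.length_pyRange_one]
  · intro k h1 h2
    have hk : k < F.length := by simpa using h2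
    rw [List.getElem_map, PySem.List.getElem_pyRange_one 0 (F.length : Int) k (by simpa using h1)]
    have hcast : (0 : Int) + (k : Int) + 1 = ((k + 1 : Nat) : Int) := by push_cast; ring
    rw [hcast, PySem.List.pyGetD_natCast]
    simp [List.getD_eq_getElem?_getD, hk]

theorem storeBeginAndEndIndicesOfSequentialNumbers_eq (sequential_nums : List Int) :
    storeBeginAndEndIndicesOfSequentialNumbers sequential_nums
      = storeBeginAndEndIndicesOfSequentialNumbers_alt sequential_nums := by
  unfold storeBeginAndEndIndicesOfSequentialNumbers storeBeginAndEndIndicesOfSequentialNumbers_alt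
  dsimp only
  set n : Int := (sequential_nums.length : Int) with hn
  rw [pv_foldB (fun i => PySem.List.pyGetD sequential_nums (i - 1) 0 ≠ PySem.List.pyGetD sequential_nums i 0),
      PySem.List.foldl_append_ite_eq_filter
        (fun i => PySem.List.pyGetD sequential_nums (i - 1) 0 ≠ PySem.List.pyGetD sequential_nums i 0)]
  set F : List Int := (PySem.List.pyRange 1 n 1).filter
      (fun i => decide (PySem.List.pyGetD sequential_nums (i - 1) 0 ≠ PySem.List.pyGetD sequential_nums i 0)) with hF
  simp only [List.singleton_append, List.nil_append]
  have hlenbs : ((0 :: F).length : Int) - 1 = (F.length : Int) := by simp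
  have hfill := pv_setloop (fun i => PySem.List.pyGetD (0 :: F) (i + 1) 0 - 1)
      F.length (List.replicate (0 :: F).length 0) (by simp)
  rw [hlenbs, hfill, pv_map_shift]
  have hdrop : (List.replicate (0 :: F).length (0 : Int)).drop F.length = [0] := by
    simp [List.drop_replicate]
  rw [hdrop]
  have hsetlast : ∀ v : Int,
      PySem.List.pySetD (F.map (· - 1) ++ [0]) ((F.length : Nat) : Int) v
        = F.map (· - 1) ++ [v] := by
    intro v
    have hlm : (F.map (· - 1)).length = F.length := by simp
    rw [PySem.List.pySetD_natCast, ← hlm, List.set_append_right _ _ (le_refl _)]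
    simp
  by_cases hb : PySem.List.pyGetD (0 :: F) (-1) 0 = n - 1
  · rw [if_pos hb, hsetlast, hb]
  · rw [if_neg hb, hsetlast]

-- ===== VERDICT (by name: the statement is the Claim_ definition above) =====
theorem storeBeginAndEndIndicesOfSequentialNumbers_spec : Claim_equal_storeBeginAndEndIndicesOfSequentialNumbers := by
  intro xs _
  exact storeBeginAndEndIndicesOfSequentialNumbers_eq xs
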